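-- pv_equiv track=rewrite | github.com/SceneGraphGen/usggen | data.py | convert_X_to_set
-- ===== SOURCE A (Python) =====
-- def convert_X_to_set(X):
--     nodes = dict()
--     for obj in X:
--         obj = int(obj)-1
--         if obj not in nodes:
--             nodes[obj] = int(1)
--         else:
--             nodes[obj] += int(1)
--     nodes = {k: v for k, v in sorted(nodes.items(), key=lambda item: item[0], reverse=False)}
--     return (list(nodes.keys()), list(nodes.values()))
-- ===== SOURCE B (Python) =====
-- def convert_X_to_set(X):
--     # sort the shifted values once, then scan runs of equal values:
--     # each run contributes one key (the value) and one count (the run length).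
--     s = sorted(int(obj) - 1 for obj in X)
--     keys, counts = [], []
--     i, n = 0, len(s)
--     while i < n:
--         v = s[i]
--         j = i + 1
--         while j < n and s[j] == v:
--             j += 1
--         keys.append(v)
--         counts.append(j - i)
--         i = j
--     return (keys, counts)
-- ===== Notes on version B (the rewrite author's own statement) =====
-- stated objective: alternative
-- what changed: Replaces the hash-map counting pass followed by an item sort and dict rebuild with sort-then-group: sort the shifted values once and emit (key, run length) in a single scan of the sorted list.
import Mathlib
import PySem

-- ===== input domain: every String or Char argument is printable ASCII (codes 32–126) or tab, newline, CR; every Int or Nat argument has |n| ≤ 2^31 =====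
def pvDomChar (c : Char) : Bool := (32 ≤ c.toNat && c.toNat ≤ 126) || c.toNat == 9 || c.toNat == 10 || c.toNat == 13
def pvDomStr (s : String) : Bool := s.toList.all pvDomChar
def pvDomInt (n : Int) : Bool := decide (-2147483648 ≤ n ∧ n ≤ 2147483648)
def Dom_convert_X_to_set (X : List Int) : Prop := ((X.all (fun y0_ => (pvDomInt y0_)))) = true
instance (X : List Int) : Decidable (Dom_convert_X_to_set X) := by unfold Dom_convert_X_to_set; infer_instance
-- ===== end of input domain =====

-- B replaces A's hash-map counting + item sort + dict rebuild with sort-then-group (same return value).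

-- ===== PORT A =====
-- literal port of A: count shifted values in a dict, sort the items by key,
-- rebuild a dict from the sorted items, return (keys, values)
def convert_X_to_set (X : List Int) : List Int × List Int :=
  let nodes : PySem.Dict Int Int :=
    X.foldl (fun d obj =>
      let o := obj - 1
      if d.contains o = false then d.insert o 1
      else d.insert o (d.getD o 0 + 1)) PySem.Dict.empty
  let sortedItems := PySem.List.sorted nodes.items (fun p => p.1) false
  let nodes2 : PySem.Dict Int Int :=
    sortedItems.foldl (fun d p => d.insert p.1 p.2) PySem.Dict.empty
  (nodes2.keys, nodes2.values)

-- ===== PORT B =====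
-- port of Source B's run scan over the sorted list: the outer while loop is the
-- recursion on the remaining suffix, the inner while loop (advance j over the
-- run of values equal to s[i]) is the takeWhile/dropWhile split of that suffix
def pvGroupRuns : List Int → List Int × List Int
  | [] => ([], [])
  | v :: t =>
    let run := t.takeWhile (fun y => y == v)
    let rest := t.dropWhile (fun y => y == v)
    let p := pvGroupRuns rest
    (v :: p.1, ((1 : Int) + run.length) :: p.2)
termination_by s => s.length
decreasing_by exact Nat.lt_succ_of_le (t.length_dropWhile_le _)

def convert_X_to_set_alt (X : List Int) : List Int × List Int :=
  pvGroupRuns (PySem.List.sorted (X.map (fun obj => obj - 1)) (fun x => x) false)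

-- ===== PRECONDITION & SPEC =====
def Spec_convert_X_to_set (X : List Int) (out : List Int × List Int) : Prop := out = convert_X_to_set_alt X
instance (X : List Int) (out : List Int × List Int) : Decidable (Spec_convert_X_to_set X out) := by unfold Spec_convert_X_to_set; infer_instance

-- ===== CLAIM (what is proved, stated in full; the proofs are below) =====
def Claim_equal_convert_X_to_set : Prop := ∀ (X : List Int), Dom_convert_X_to_set X → Spec_convert_X_to_set X (convert_X_to_set X)

-- ===== LEMMAS AND PROOFS =====

theorem pv_rest_gt (v : Int) (t : List Int) (ht : t.Pairwise (· ≤ ·))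
    (hv : ∀ y ∈ t, v ≤ y) : ∀ y ∈ t.dropWhile (fun y => y == v), v < y := by
  induction t with
  | nil => simp
  | cons a t' ih =>
    rw [List.dropWhile_cons]
    by_cases ha : a = v
    · subst ha
      simp only [BEq.rfl, if_true]
      exact ih (List.pairwise_cons.1 ht).2 (fun y hy => hv y (List.mem_cons_of_mem _ hy))
    · have hva : v < a := lt_of_le_of_ne (hv a (List.mem_cons_self ..)) (Ne.symm ha)
      simp only [beq_iff_eq, ha, if_false]
      intro y hy
      rcases List.mem_cons.1 hy with rfl | hy
      · exact hva
      · exact lt_of_lt_of_le hva ((List.pairwise_cons.1 ht).1 y hy)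

theorem pvGroupRuns_spec (s : List Int) (hs : s.Pairwise (· ≤ ·)) :
    (pvGroupRuns s).1.Pairwise (· < ·) ∧ (∀ k, k ∈ (pvGroupRuns s).1 ↔ k ∈ s) ∧
      (pvGroupRuns s).2 = (pvGroupRuns s).1.map (fun k => (s.count k : Int)) := by
  induction s using pvGroupRuns.induct with
  | case1 => simp [pvGroupRuns]
  | case2 v t rest ih =>
    obtain ⟨hv, ht⟩ := List.pairwise_cons.1 hs
    have hgt := pv_rest_gt v t ht hv
    have hrest_pw : (t.dropWhile (fun y => y == v)).Pairwise (· ≤ ·) :=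
      ht.sublist (List.dropWhile_sublist _)
    obtain ⟨ih1, ih2, ih3⟩ := ih hrest_pw
    have hGR : pvGroupRuns (v :: t) =
        (v :: (pvGroupRuns (t.dropWhile (fun y => y == v))).1,
         ((1 : Int) + (t.takeWhile (fun y => y == v)).length) ::
           (pvGroupRuns (t.dropWhile (fun y => y == v))).2) := by
      rw [pvGroupRuns]
    have hrun : ∀ y ∈ t.takeWhile (fun y => y == v), y = v := by
      intro y hy; simpa using List.mem_takeWhile_imp hy
    have hsplit : t.takeWhile (fun y => y == v) ++ t.dropWhile (fun y => y == v) = t :=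
      List.takeWhile_append_dropWhile
    have hkmem : ∀ k ∈ (pvGroupRuns (t.dropWhile (fun y => y == v))).1, v < k := by
      intro k hk; exact hgt k ((ih2 k).1 hk)
    have htc : ∀ k : Int, t.count k =
        (t.takeWhile (fun y => y == v)).count k + (t.dropWhile (fun y => y == v)).count k := by
      intro k
      conv_lhs => rw [← hsplit]
      rw [List.count_append]
    have hcv : (v :: t).count v = (t.takeWhile (fun y => y == v)).length + 1 := by
      rw [List.count_cons_self, htc]
      have h1 : (t.takeWhile (fun y => y == v)).count v = (t.takeWhile (fun y => y == v)).length :=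
        List.count_eq_length.2 (fun b hb => by rw [hrun b hb])
      have h2 : (t.dropWhile (fun y => y == v)).count v = 0 :=
        List.count_eq_zero.2 (fun h => lt_irrefl v (hgt v h))
      omega
    have hck : ∀ k, v < k → (v :: t).count k = (t.dropWhile (fun y => y == v)).count k := by
      intro k hk
      rw [List.count_cons_of_ne (by exact fun h => absurd h (by omega)), htc]
      have h1 : (t.takeWhile (fun y => y == v)).count k = 0 :=
        List.count_eq_zero.2 (fun h => by have := hrun k h; omega)
      omega
    refine ⟨?_, ?_, ?_⟩
    · rw [hGR]
      exact List.pairwise_cons.2 ⟨hkmem, ih1⟩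
    · intro k
      rw [hGR]
      simp only [List.mem_cons]
      constructor
      · rintro (rfl | hk)
        · exact Or.inl rfl
        · exact Or.inr ((List.dropWhile_sublist _).mem ((ih2 k).1 hk))
      · rintro (rfl | hk)
        · exact Or.inl rfl
        · rw [← hsplit] at hk
          rcases List.mem_append.1 hk with hk | hk
          · exact Or.inl (hrun k hk)
          · exact Or.inr ((ih2 k).2 hk)
    · rw [hGR]
      simp only [List.map_cons]
      congr 1
      · rw [hcv]; push_cast; ring
      · rw [ih3]
        exact List.map_congr_left (fun k hk => by rw [hck k (hkmem k hk)])

theorem pv_main (m : List Int) :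
    (let sortedItems := PySem.List.sorted (PySem.Dict.counter m : PySem.Dict Int Int).items (fun p => p.1) false
     let nodes2 : PySem.Dict Int Int :=
       sortedItems.foldl (fun d p => d.insert p.1 p.2) PySem.Dict.empty
     ((nodes2.keys, nodes2.values) : List Int × List Int))
      = pvGroupRuns (PySem.List.sorted m (fun x => x) false) := by
  simp only
  set s := PySem.List.sorted m (fun x => x) false with hsdef
  set si := PySem.List.sorted (PySem.Dict.counter m : PySem.Dict Int Int).items (fun p => p.1) false with hsidef
  have hs_pw : s.Pairwise (· ≤ ·) := PySem.List.sorted_pairwise m (fun x => x)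
  have hs_perm : s.Perm m := PySem.List.sorted_perm m (fun x => x) false
  obtain ⟨hB1, hB2, hB3⟩ := pvGroupRuns_spec s hs_pw
  have h_si_perm : si.Perm (PySem.Dict.counter m : PySem.Dict Int Int).items :=
    PySem.List.sorted_perm _ _ false
  have h_si_pw : si.Pairwise (fun a b => a.1 ≤ b.1) := PySem.List.sorted_pairwise _ _
  have h_items : (PySem.Dict.counter m : PySem.Dict Int Int).items
      = (PySem.Set.ofList m).map (fun k => (k, (List.count k m : Int))) :=
    PySem.Dict.items_counter m
  have hKeysNodup : (si.map (fun p => p.1)).Nodup := by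
    have hp : (si.map (fun p => p.1)).Perm (PySem.Set.ofList m) := by
      have := h_si_perm.map (fun p => p.1)
      rw [h_items, List.map_map] at this
      simpa [Function.comp_def] using this
    exact hp.symm.nodup (PySem.Set.nodup_ofList m)
  have h_nodes2 : (si.foldl (fun d p => d.insert p.1 p.2) PySem.Dict.empty).items = si := by
    have := PySem.Dict.items_foldl_insert_fresh si (fun p => p.1) (fun p => p.2)
      PySem.Dict.empty (fun a _ => by simp [PySem.Dict.contains_empty]) hKeysNodup
    simpa using this
  have h_snd : ∀ p ∈ si, p.2 = (List.count p.1 m : Int) := by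
    intro p hp
    have : p ∈ (PySem.Set.ofList m).map (fun k => (k, (List.count k m : Int))) := by
      rw [← h_items]; exact h_si_perm.mem_iff.1 hp
    obtain ⟨k, _, rfl⟩ := List.mem_map.1 this
    rfl
  have hkeysA_pw : (si.map (fun p => p.1)).Pairwise (· ≤ ·) :=
    List.Pairwise.map (fun (p : Int × Int) => p.1) (fun a b h => h) h_si_pw
  have hkeysB_pw : (pvGroupRuns s).1.Pairwise (· ≤ ·) := hB1.imp le_of_lt
  have hkeysB_nd : (pvGroupRuns s).1.Nodup := hB1.imp (fun h => ne_of_lt h)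
  have hmem : ∀ k : Int, k ∈ si.map (fun p => p.1) ↔ k ∈ (pvGroupRuns s).1 := by
    intro k
    rw [hB2 k, hs_perm.mem_iff]
    constructor
    · intro hk
      obtain ⟨p, hp, rfl⟩ := List.mem_map.1 hk
      have : p ∈ (PySem.Set.ofList m).map (fun k => (k, (List.count k m : Int))) := by
        rw [← h_items]; exact h_si_perm.mem_iff.1 hp
      obtain ⟨j, hj, rfl⟩ := List.mem_map.1 this
      exact (PySem.Set.mem_ofList m _).1 hj
    · intro hk
      refine List.mem_map.2 ⟨(k, (List.count k m : Int)), ?_, rfl⟩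
      refine h_si_perm.mem_iff.2 ?_
      rw [h_items]
      exact List.mem_map.2 ⟨k, (PySem.Set.mem_ofList m k).2 hk, rfl⟩
  have hkeys : si.map (fun p => p.1) = (pvGroupRuns s).1 :=
    PySem.List.eq_of_perm_of_pairwise_le_of_injective (fun x => x) Function.injective_id
      ((List.perm_ext_iff_of_nodup hKeysNodup hkeysB_nd).2 hmem) hkeysA_pw hkeysB_pw
  have hvals : si.map (fun p => p.2) = (pvGroupRuns s).2 := by
    rw [hB3]
    have h1 : si.map (fun p => p.2) = si.map (fun p => ((List.count p.1 m : Nat) : Int)) :=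
      List.map_congr_left h_snd
    rw [h1, ← hkeys, List.map_map]
    refine List.map_congr_left ?_
    intro p _
    simp [hs_perm.count_eq]
  simp only [PySem.Dict.keys, PySem.Dict.values, h_nodes2]
  exact Prod.ext hkeys hvals

-- ===== VERDICT (by name: the statement is the Claim_ definition above) =====
theorem convert_X_to_set_spec : Claim_equal_convert_X_to_set := by
  intro X _
  unfold Spec_convert_X_to_set convert_X_to_set convert_X_to_set_alt
  have hnodes : X.foldl (fun d obj =>
        let o := obj - 1
        if d.contains o = false then d.insert o 1
        else d.insert o (d.getD o 0 + 1)) (PySem.Dict.empty : PySem.Dict Int Int)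
      = PySem.Dict.counter (X.map (fun obj => obj - 1)) := by
    rw [PySem.List.foldl_congr_mem _ _
      (fun (d : PySem.Dict Int Int) (obj : Int) => d.insert (obj - 1) (d.getD (obj - 1) 0 + 1)) _ ?_]
    · rw [← PySem.Dict.foldl_insert_getD_add_one_eq_counter, List.foldl_map]
    · intro acc x _
      by_cases h : acc.contains (x - 1) = false
      · simp [h, PySem.Dict.getD_of_not_contains _ _ h]
      · simp [h]
  rw [hnodes]
  exact pv_main (X.map (fun obj => obj - 1))
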